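-- pv_equiv track=rewrite | github.com/UtrechtUniversity/yoda-clienttools | yclienttools/importgroups.py | _get_duplicate_columns
-- ===== SOURCE A (Python) =====
-- from typing import List, Set, Tuple
--
-- def _get_csv_predefined_labels(yoda_version: str) -> List[str]:
--     if yoda_version in ('1.7', '1.8'):
--         return ['category', 'subcategory', 'groupname']
--     else:
--         return ['category', 'subcategory', 'groupname', 'expiration_date', 'schema_id']
--
-- def _get_duplicate_columns(fields_list: List[str], yoda_version: str) -> Set[str]:
--     """ Only checks columns that cannot have duplicates """
--     fields_seen = set()
--     duplicate_fields = set()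
--
--     for field in fields_list:
--         if (field in _get_csv_predefined_labels(yoda_version)):
--             if field in fields_seen:
--                 duplicate_fields.add(field)
--             else:
--                 fields_seen.add(field)
--
--     return duplicate_fields
-- ===== SOURCE B (Python) =====
-- from typing import List, Set
--
-- def _get_csv_predefined_labels(yoda_version: str) -> List[str]:
--     if yoda_version in ('1.7', '1.8'):
--         return ['category', 'subcategory', 'groupname']
--     else:
--         return ['category', 'subcategory', 'groupname', 'expiration_date', 'schema_id']
--
-- def _get_duplicate_columns(fields_list: List[str], yoda_version: str) -> Set[str]:
--     """ Only checks columns that cannot have duplicates """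
--     labels = set(_get_csv_predefined_labels(yoda_version))
--     return {field for i, field in enumerate(fields_list)
--             if field in labels and fields_list[:i].count(field) == 1}
-- ===== Notes on version B (the rewrite author's own statement) =====
-- stated objective: simpler
-- what changed: Replaces A's stateful loop maintaining two accumulator sets (seen/duplicates) by a single stateless set comprehension that keeps a field iff it is a predefined label and occurs exactly once before its position.
import Mathlib
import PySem

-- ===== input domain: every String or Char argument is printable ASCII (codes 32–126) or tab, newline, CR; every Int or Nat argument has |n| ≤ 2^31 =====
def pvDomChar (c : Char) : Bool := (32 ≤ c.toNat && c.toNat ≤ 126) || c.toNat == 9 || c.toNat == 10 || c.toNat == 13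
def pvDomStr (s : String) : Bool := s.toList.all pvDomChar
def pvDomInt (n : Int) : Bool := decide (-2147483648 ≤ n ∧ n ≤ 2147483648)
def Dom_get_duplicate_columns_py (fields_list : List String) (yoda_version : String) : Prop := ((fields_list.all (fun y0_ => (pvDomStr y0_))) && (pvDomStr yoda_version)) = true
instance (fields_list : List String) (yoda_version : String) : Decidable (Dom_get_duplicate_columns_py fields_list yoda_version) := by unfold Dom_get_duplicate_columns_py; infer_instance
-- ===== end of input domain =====

-- B replaces A's stateful seen/duplicate two-set loop by a single comprehension that keeps a field
-- iff it is a predefined label and occurs exactly once before its position (objective: simpler).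
-- Both programs return a Python set; the ports realise it as the list of additions in order.

-- ===== PORT A =====
def get_csv_predefined_labels_py (yoda_version : String) : List String :=
  if yoda_version = "1.7" ∨ yoda_version = "1.8" then
    ["category", "subcategory", "groupname"]
  else
    ["category", "subcategory", "groupname", "expiration_date", "schema_id"]

def get_duplicate_columns_py (fields_list : List String) (yoda_version : String) : List String :=
  (fields_list.foldl
    (fun (st : PySem.Set String × PySem.Set String) field =>
      if (get_csv_predefined_labels_py yoda_version).contains field then
        if PySem.Set.contains st.1 field then
          (st.1, PySem.Set.add st.2 field)
        else
          (PySem.Set.add st.1 field, st.2)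
      else st)
    (PySem.Set.empty, PySem.Set.empty)).2

-- ===== PORT B =====
def get_duplicate_columns_py_alt (fields_list : List String) (yoda_version : String) : List String :=
  let labels : PySem.Set String := PySem.Set.ofList (get_csv_predefined_labels_py yoda_version)
  (PySem.List.enumerate fields_list 0).foldl
    (fun s q =>
      if PySem.Set.contains labels q.2 &&
         ((PySem.List.slice fields_list none (some q.1)).count q.2 == 1) then
        PySem.Set.add s q.2
      else s)
    PySem.Set.empty

-- ===== PRECONDITION & SPEC =====
def Spec_get_duplicate_columns_py (fields_list : List String) (yoda_version : String) (out : List String) : Prop := out = get_duplicate_columns_py_alt fields_list yoda_version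
instance (fields_list : List String) (yoda_version : String) (out : List String) : Decidable (Spec_get_duplicate_columns_py fields_list yoda_version out) := by unfold Spec_get_duplicate_columns_py; infer_instance

-- ===== CLAIM (what is proved, stated in full; the proofs are below) =====
def Claim_equal_get_duplicate_columns_py : Prop := ∀ (fields_list : List String) (yoda_version : String), Dom_get_duplicate_columns_py fields_list yoda_version → Spec_get_duplicate_columns_py fields_list yoda_version (get_duplicate_columns_py fields_list yoda_version)

-- ===== LEMMAS AND PROOFS =====

-- Loop correspondence: after a processed prefix p (with seen = the predefined labels of p and
-- d = the duplicates found in p), A's remaining loop and B's remaining comprehension agree.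
theorem pv_loop_eq (L full : List String) :
    ∀ (rest p d : List String),
      p ++ rest = full →
      (∀ f, f ∈ d ↔ (f ∈ L ∧ 2 ≤ p.count f)) →
      (rest.foldl
        (fun (st : PySem.Set String × PySem.Set String) field =>
          if L.contains field then
            if PySem.Set.contains st.1 field then
              (st.1, PySem.Set.add st.2 field)
            else
              (PySem.Set.add st.1 field, st.2)
          else st)
        (PySem.Set.ofList (p.filter (fun f => L.contains f)), d)).2
      = (PySem.List.enumerate rest (p.length : Int)).foldl
          (fun s q =>
            if PySem.Set.contains (PySem.Set.ofList L) q.2 &&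
               ((PySem.List.slice full none (some q.1)).count q.2 == 1) then
              PySem.Set.add s q.2
            else s) d := by
  intro rest
  induction rest with
  | nil => intro p d _ _; simp [PySem.List.enumerate]
  | cons f rest ih =>
    intro p d hfull hinv
    rw [PySem.List.enumerate_cons]
    simp only [List.foldl_cons]
    have hslice : PySem.List.slice full none (some (p.length : Int)) = p := by
      rw [PySem.List.slice_to_natCast, ← hfull, List.take_left]
    have hcnt_ne : ∀ g, g ≠ f → List.count g (p ++ [f]) = List.count g p := by
      intro g hg
      have hz : List.count g [f] = 0 := List.count_eq_zero.mpr (by simpa using hg)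
      rw [List.count_append, hz]
      omega
    have hcnt_self : List.count f (p ++ [f]) = List.count f p + 1 := by
      rw [List.count_append]; simp
    have hfull' : (p ++ [f]) ++ rest = full := by simpa using hfull
    by_cases hfL : f ∈ L
    · rcases Nat.lt_or_ge (p.count f) 2 with hc | hc
      · rcases Nat.lt_or_ge (p.count f) 1 with hc0 | hc1
        · -- first occurrence: A extends seen, B skips
          have hc0' : List.count f p = 0 := by omega
          have hp : f ∉ p := by rw [← List.count_eq_zero]; exact hc0'
          have hIH := ih (p ++ [f]) d hfull' (by
            intro g
            by_cases hg : g = f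
            · rw [hg]
              rw [hinv f, hcnt_self, hc0']
              constructor <;> (rintro ⟨h1, h2⟩; exact ⟨h1, by omega⟩)
            · rw [hinv g, hcnt_ne g hg])
          simp only [List.length_append, List.length_singleton, Nat.cast_add, Nat.cast_one] at hIH
          simpa [hfL, hp, hslice, hc0', List.filter_cons, List.filter_nil, List.filter_append, PySem.Set.ofList_append_singleton, PySem.Set.add_eq_ite, PySem.Set.mem_ofList, List.mem_filter] using hIH
        · -- second occurrence: both add f
          have hc1' : List.count f p = 1 := by omega
          have hp : f ∈ p := List.count_pos_iff.mp (by omega)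
          have hIH := ih (p ++ [f]) (PySem.Set.add d f) hfull' (by
            intro g
            rw [PySem.Set.mem_add]
            by_cases hg : g = f
            · rw [hg]
              rw [hinv f, hcnt_self, hc1']
              simp [hfL]
            · rw [hinv g, hcnt_ne g hg]
              simp [hg])
          simp only [List.length_append, List.length_singleton, Nat.cast_add, Nat.cast_one] at hIH
          simpa [hfL, hp, hslice, hc1', List.filter_cons, List.filter_nil, List.filter_append, PySem.Set.ofList_append_singleton, PySem.Set.add_eq_ite, PySem.Set.mem_ofList, List.mem_filter] using hIH
      · -- later occurrence: A's add to duplicates is a no-op, B skips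
        have hp : f ∈ p := List.count_pos_iff.mp (by omega)
        have hfd : f ∈ d := (hinv f).mpr ⟨hfL, hc⟩
        have hcne' : List.count f p ≠ 1 := by omega
        have hIH := ih (p ++ [f]) d hfull' (by
          intro g
          by_cases hg : g = f
          · rw [hg]
            rw [hinv f, hcnt_self]
            constructor <;> (rintro ⟨h1, h2⟩; exact ⟨h1, by omega⟩)
          · rw [hinv g, hcnt_ne g hg])
        simp only [List.length_append, List.length_singleton, Nat.cast_add, Nat.cast_one] at hIH
        simpa [hfL, hp, hfd, hslice, hcne', List.filter_cons, List.filter_nil, List.filter_append, PySem.Set.ofList_append_singleton, PySem.Set.add_eq_ite, PySem.Set.mem_ofList, List.mem_filter] using hIH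
    · -- not a predefined label: both skip
      have hIH := ih (p ++ [f]) d hfull' (by
        intro g
        by_cases hg : g = f
        · rw [hg]
          rw [hinv f]
          simp [hfL]
        · rw [hinv g, hcnt_ne g hg])
      simp only [List.length_append, List.length_singleton, Nat.cast_add, Nat.cast_one] at hIH
      simpa [hfL, List.filter_cons, List.filter_nil, List.filter_append, PySem.Set.ofList_append_singleton, PySem.Set.add_eq_ite, PySem.Set.mem_ofList, List.mem_filter] using hIH

-- ===== VERDICT (by name: the statement is the Claim_ definition above) =====
theorem get_duplicate_columns_py_spec : Claim_equal_get_duplicate_columns_py := by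
  intro fields_list yoda_version _
  unfold Spec_get_duplicate_columns_py
  unfold get_duplicate_columns_py get_duplicate_columns_py_alt
  have := pv_loop_eq (get_csv_predefined_labels_py yoda_version) fields_list
    fields_list [] [] (by simp) (by simp)
  simpa using this
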